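-- pv_equiv track=rewrite | github.com/jlhg/bdorpy | bdorpy/blastnol.py | combine_hsps
-- ===== SOURCE A (Python) =====
-- def combine_hsps(hsps):
--     """hsps: a list of tuples"""
--     pos_start = None
--     pos_end = None
--     lines = []
--
--     for hsp_start, hsp_end, line in hsps:
--         if pos_start is None:
--             pos_start = hsp_start
--             pos_end = hsp_end
--         else:
--             pos_start = min(pos_start, hsp_start)
--             pos_end = max(pos_end, hsp_end)
--         lines = lines + line
--
--     return pos_start, pos_end, lines
-- ===== SOURCE B (Python) =====
-- def combine_hsps(hsps):
--     """hsps: a list of tuples"""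
--     if not hsps:
--         return None, None, []
--     starts, ends, parts = zip(*hsps)
--     return min(starts), max(ends), [x for p in parts for x in p]
-- ===== Notes on version B (the rewrite author's own statement) =====
-- stated objective: idiomatic
-- what changed: Replaces A's single fused loop carrying three accumulators (with quadratic lines = lines + line recopying) by an empty-list guard plus three independent builtin reductions: min of starts, max of ends, and a flattening comprehension.
import Mathlib
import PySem

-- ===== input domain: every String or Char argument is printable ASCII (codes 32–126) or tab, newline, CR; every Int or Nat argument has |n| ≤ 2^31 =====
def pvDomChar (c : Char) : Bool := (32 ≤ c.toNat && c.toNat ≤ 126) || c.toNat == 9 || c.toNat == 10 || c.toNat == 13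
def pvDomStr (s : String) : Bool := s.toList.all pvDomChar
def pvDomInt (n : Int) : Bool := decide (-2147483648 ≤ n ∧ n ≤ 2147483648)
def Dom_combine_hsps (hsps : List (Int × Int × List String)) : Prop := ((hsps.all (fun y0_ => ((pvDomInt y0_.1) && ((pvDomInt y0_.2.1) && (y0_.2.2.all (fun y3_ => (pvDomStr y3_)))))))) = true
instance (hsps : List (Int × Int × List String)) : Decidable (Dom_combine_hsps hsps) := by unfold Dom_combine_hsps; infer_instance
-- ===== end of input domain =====

-- B replaces A's single fused loop (three accumulators updated together) by an empty-list
-- guard plus three independent reductions: min of the starts, max of the ends, flatten of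
-- the line lists (idiomatic decomposition; equivalence is about the return value only).

-- ===== PORT A =====
-- single loop: pos_start/pos_end start as None, lines accumulates by list concatenation
def combine_hsps (hsps : List (Int × Int × List String)) : Option Int × Option Int × List String :=
  hsps.foldl
    (fun acc t =>
      match acc with
      | (none, _, ls) => (some t.1, some t.2.1, ls ++ t.2.2)
      | (some s, e, ls) =>
          -- pos_end is always `some` when pos_start is; `e.getD t.2.1` only reads that value
          (some (min s t.1), some (max (e.getD t.2.1) t.2.1), ls ++ t.2.2))
    (none, none, [])

-- ===== PORT B =====
def combine_hsps_alt (hsps : List (Int × Int × List String)) : Option Int × Option Int × List String :=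
  match hsps with
  | [] => (none, none, [])
  | _ :: _ =>
      (PySem.List.min? (hsps.map (fun t => t.1)) (fun x => x),
       PySem.List.max? (hsps.map (fun t => t.2.1)) (fun x => x),
       (hsps.map (fun t => t.2.2)).flatten)

-- ===== PRECONDITION & SPEC =====
def Spec_combine_hsps (hsps : List (Int × Int × List String)) (out : Option Int × Option Int × List String) : Prop := out = combine_hsps_alt hsps
instance (hsps : List (Int × Int × List String)) (out : Option Int × Option Int × List String) : Decidable (Spec_combine_hsps hsps out) := by unfold Spec_combine_hsps; infer_instance

-- ===== CLAIM (what is proved, stated in full; the proofs are below) =====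
def Claim_equal_combine_hsps : Prop := ∀ (hsps : List (Int × Int × List String)), Dom_combine_hsps hsps → Spec_combine_hsps hsps (combine_hsps hsps)

-- ===== LEMMAS AND PROOFS =====

-- characterisation of A's loop once the accumulators are initialised
theorem combine_hsps_fold (rest : List (Int × Int × List String)) (a b : Int) (ls : List String) :
    List.foldl
      (fun acc t =>
        match acc with
        | (none, _, ls) => (some t.1, some t.2.1, ls ++ t.2.2)
        | (some s, e, ls) =>
            (some (min s t.1), some (max (e.getD t.2.1) t.2.1), ls ++ t.2.2))
      ((some a : Option Int), (some b : Option Int), ls) rest =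
    (some ((rest.map (fun t => t.1)).foldl min a),
     some ((rest.map (fun t => t.2.1)).foldl max b),
     ls ++ (rest.map (fun t => t.2.2)).flatten) := by
  induction rest generalizing a b ls with
  | nil => simp
  | cons h t ih => simp [ih, List.append_assoc]

-- ===== VERDICT (by name: the statement is the Claim_ definition above) =====
theorem combine_hsps_spec : Claim_equal_combine_hsps := by
  intro hsps _
  unfold Spec_combine_hsps
  cases hsps with
  | nil => rfl
  | cons h t =>
      simp only [combine_hsps, combine_hsps_alt, List.foldl_cons, List.map_cons,
        PySem.List.min?_id_cons, PySem.List.max?_id_cons, combine_hsps_fold]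
      simp
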